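-- pv_equiv track=rewrite | github.com/nickkhod/IPZ-2024 | Практика/IPZ-33/17_Anastasiia/task 1/task 1 Стешенко.py | obs
-- ===== SOURCE A (Python) =====
-- def obs(input_string):
--
--     vowels = "aeiouAEIOU"
--     vowel_part = ''.join(sorted([char for char in input_string if char in vowels], reverse=True))
--
--     consonants = "bcdfghjklmnpqrstvwxyzBCDFGHJKLMNPQRSTVWXYZ"
--     consonant_list = [char for char in input_string if char in consonants]
--     consonant_part = ''.join(sorted(consonant_list, reverse=True))
--
--     has_enough_consonants = len(consonant_list) >= 4
--
--     result = (vowel_part, has_enough_consonants, consonant_part)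
--     return result
-- ===== SOURCE B (Python) =====
-- def obs(input_string):
--     # Count each alphabet letter once (C-level str.count) and emit the fixed
--     # alphabets in descending order repeated by their counts: no comparison sort.
--     vowels_desc = "uoieaUOIEA"
--     vowel_part = ''.join(c * input_string.count(c) for c in vowels_desc)
--
--     consonants_desc = "zyxwvtsrqpnmlkjhgfdcbZYXWVTSRQPNMLKJHGFDCB"
--     cons_counts = [input_string.count(c) for c in consonants_desc]
--     consonant_part = ''.join(c * k for c, k in zip(consonants_desc, cons_counts))
--     has_enough_consonants = sum(cons_counts) >= 4
--
--     return (vowel_part, has_enough_consonants, consonant_part)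
-- ===== Notes on version B (the rewrite author's own statement) =====
-- stated objective: faster
-- what changed: Replaces the two comparison sorts of filtered characters with one str.count per letter of the fixed 10-vowel/42-consonant alphabets, emitted in descending alphabet order repeated by their counts (counting sort over a fixed alphabet).
import Mathlib
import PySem

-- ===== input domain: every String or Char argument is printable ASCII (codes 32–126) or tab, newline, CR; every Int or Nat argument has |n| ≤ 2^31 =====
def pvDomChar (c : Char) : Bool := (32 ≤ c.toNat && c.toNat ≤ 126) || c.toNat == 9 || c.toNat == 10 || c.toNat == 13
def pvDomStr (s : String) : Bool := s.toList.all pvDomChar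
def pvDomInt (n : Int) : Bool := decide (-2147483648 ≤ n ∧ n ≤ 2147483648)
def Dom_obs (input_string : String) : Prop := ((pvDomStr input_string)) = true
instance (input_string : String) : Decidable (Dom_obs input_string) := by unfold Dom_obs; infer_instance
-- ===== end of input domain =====

-- B replaces A's two comparison sorts of the filtered characters by per-letter
-- counts emitted along the fixed alphabets in descending order (counting sort).

-- ===== PORT A =====
-- 'char in vowels' for a single character 'char' is membership of that character.
def obs (input_string : String) : String × Bool × String :=
  let vowels := "aeiouAEIOU"
  let vowel_part := String.ofList (PySem.List.sorted
    (input_string.toList.filter (fun char => vowels.toList.contains char)) (fun x => x) true)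
  let consonants := "bcdfghjklmnpqrstvwxyzBCDFGHJKLMNPQRSTVWXYZ"
  let consonant_list := input_string.toList.filter (fun char => consonants.toList.contains char)
  let consonant_part := String.ofList (PySem.List.sorted consonant_list (fun x => x) true)
  let has_enough_consonants := decide ((consonant_list.length : Int) ≥ 4)
  (vowel_part, has_enough_consonants, consonant_part)

-- ===== PORT B =====
def obs_alt (input_string : String) : String × Bool × String :=
  let vowels_desc := "uoieaUOIEA"
  let vowel_part := String.ofList (vowels_desc.toList.flatMap
    (fun c => PySem.List.pyRepeat [c] (PySem.Str.count input_string (String.ofList [c]) : Int)))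
  let consonants_desc := "zyxwvtsrqpnmlkjhgfdcbZYXWVTSRQPNMLKJHGFDCB"
  let cons_counts := consonants_desc.toList.map
    (fun c => PySem.Str.count input_string (String.ofList [c]))
  let consonant_part := String.ofList ((consonants_desc.toList.zip cons_counts).flatMap
    (fun p => PySem.List.pyRepeat [p.1] (p.2 : Int)))
  let has_enough_consonants := decide ((cons_counts.sum : Int) ≥ 4)
  (vowel_part, has_enough_consonants, consonant_part)

-- ===== PRECONDITION & SPEC =====
def Spec_obs (input_string : String) (out : String × Bool × String) : Prop := out = obs_alt input_string
instance (input_string : String) (out : String × Bool × String) : Decidable (Spec_obs input_string out) := by unfold Spec_obs; infer_instance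

-- ===== CLAIM (what is proved, stated in full; the proofs are below) =====
def Claim_equal_obs : Prop := ∀ (input_string : String), Dom_obs input_string → Spec_obs input_string (obs input_string)

-- ===== LEMMAS AND PROOFS =====

-- count of an element in the flatMap of replicate blocks over a duplicate-free alphabet
theorem count_flatMap_replicate (alpha : List Char) (hnd : alpha.Nodup)
    (n : Char → Nat) (a : Char) :
    (alpha.flatMap (fun c => List.replicate (n c) c)).count a
      = if a ∈ alpha then n a else 0 := by
  induction alpha with
  | nil => simp
  | cons c t ih =>
    rcases List.nodup_cons.mp hnd with ⟨hc, ht⟩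
    by_cases h : a = c
    · subst h
      simp [List.count_append, ih ht, hc]
    · simp [List.count_append, List.count_replicate, ih ht, Ne.symm h, h]

-- the flatMap of replicate blocks over a strictly descending alphabet is descending
theorem pairwise_flatMap_replicate (alpha : List Char)
    (hsort : alpha.Pairwise (fun a b => b < a)) (n : Char → Nat) :
    (alpha.flatMap (fun c => List.replicate (n c) c)).Pairwise (fun a b => b ≤ a) := by
  induction alpha with
  | nil => simp
  | cons c t ih =>
    rcases List.pairwise_cons.mp hsort with ⟨hc, ht⟩
    rw [List.flatMap_cons, List.pairwise_append]
    refine ⟨List.pairwise_replicate.mpr (Or.inr le_rfl), ih ht, ?_⟩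
    intro a ha b hb
    rcases List.mem_flatMap.mp hb with ⟨c', hc', hb'⟩
    rw [List.eq_of_mem_replicate ha, List.eq_of_mem_replicate hb']
    exact le_of_lt (hc c' hc')

-- counting sort: descending sort of a filtered list = replicate blocks along the
-- descending alphabet, for any filter predicate agreeing with alphabet membership
theorem sorted_rev_eq_flatMap_replicate (alpha : List Char) (hnd : alpha.Nodup)
    (hsort : alpha.Pairwise (fun a b => b < a))
    (p : Char → Bool) (hp : ∀ c, p c = alpha.contains c) (xs : List Char) :
    PySem.List.sorted (xs.filter p) (fun x => x) true
      = alpha.flatMap (fun c => List.replicate (xs.count c) c) := by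
  have hperm : (alpha.flatMap (fun c => List.replicate (xs.count c) c)).Perm (xs.filter p) := by
    rw [List.perm_iff_count]
    intro a
    rw [count_flatMap_replicate alpha hnd _ a]
    by_cases h : a ∈ alpha
    · rw [List.count_filter (by rw [hp a]; exact List.contains_iff_mem.mpr h)]
      simp [h]
    · have : a ∉ xs.filter p := by
        intro hmem
        rcases List.mem_filter.mp hmem with ⟨_, hpa⟩
        rw [hp a] at hpa
        exact h (List.contains_iff_mem.mp hpa)
      simp [h, List.count_eq_zero_of_not_mem this]
  have hS : (PySem.List.sorted (xs.filter p) (fun x => x) true).Perm (xs.filter p) :=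
    PySem.List.sorted_perm _ _ _
  have hrev : (PySem.List.sorted (xs.filter p) (fun x => x) true).reverse
      = (alpha.flatMap (fun c => List.replicate (xs.count c) c)).reverse := by
    apply PySem.List.eq_of_perm_of_pairwise_le_of_injective (fun x => x)
      (fun _ _ h => h)
    · exact (List.reverse_perm _).trans
        ((hS.trans hperm.symm).trans (List.reverse_perm _).symm)
    · exact List.pairwise_reverse.mpr (PySem.List.sorted_pairwise_rev _ _)
    · exact List.pairwise_reverse.mpr (pairwise_flatMap_replicate alpha hsort _)
  exact List.reverse_injective hrev

-- Python's s.count(c) for a single character c is the character count of s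
theorem chars_count_go_singleton (c : Char) (l : List Char) (fuel acc : Nat)
    (h : l.length ≤ fuel) :
    PySem.Chars.count.go [c] fuel l acc = acc + l.count c := by
  induction l generalizing fuel acc with
  | nil => cases fuel <;> simp [PySem.Chars.count.go]
  | cons hd t ih =>
    cases fuel with
    | zero => simp at h
    | succ f =>
      have hf : t.length ≤ f := by simpa using h
      rw [PySem.Chars.count.go]
      by_cases hc : c = hd
      · subst hc
        simp [List.isPrefixOf, ih _ _ hf]
        omega
      · simp [List.isPrefixOf, hc, ih _ _ hf, Ne.symm hc]

theorem str_count_singleton (s : String) (c : Char) :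
    PySem.Str.count s (String.ofList [c]) = s.toList.count c := by
  rw [PySem.Str.count_eq]
  have h1 : (String.ofList [c]).toList = [c] := by simp
  rw [h1]
  unfold PySem.Chars.count
  simp [chars_count_go_singleton c s.toList s.length 0 (le_of_eq (by simp))]

-- emission along zip (alphabet, its counts) = emission along the alphabet
theorem zip_map_flatMap (l : List Char) (f : Char → Nat) :
    ((l.zip (l.map f)).flatMap (fun p => List.replicate p.2 p.1))
      = l.flatMap (fun c => List.replicate (f c) c) := by
  induction l with
  | nil => simp
  | cons h t ih => simp [ih]

-- ===== VERDICT (by name: the statement is the Claim_ definition above) =====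
set_option maxHeartbeats 1000000 in
theorem obs_spec : Claim_equal_obs := by
  intro s _
  unfold Spec_obs obs obs_alt
  simp only [str_count_singleton, PySem.List.pyRepeat_singleton, Int.toNat_natCast]
  have hv := sorted_rev_eq_flatMap_replicate ("uoieaUOIEA".toList) (by decide) (by decide)
    (fun char => "aeiouAEIOU".toList.contains char)
    (fun c => by
      have hperm : ("aeiouAEIOU".toList).Perm ("uoieaUOIEA".toList) := by decide
      rw [Bool.eq_iff_iff, List.contains_iff_mem, List.contains_iff_mem]
      exact hperm.mem_iff)
    s.toList
  have hk := sorted_rev_eq_flatMap_replicate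
    ("zyxwvtsrqpnmlkjhgfdcbZYXWVTSRQPNMLKJHGFDCB".toList) (by decide) (by decide)
    (fun char => "bcdfghjklmnpqrstvwxyzBCDFGHJKLMNPQRSTVWXYZ".toList.contains char)
    (fun c => by
      have hperm : ("bcdfghjklmnpqrstvwxyzBCDFGHJKLMNPQRSTVWXYZ".toList).Perm
          ("zyxwvtsrqpnmlkjhgfdcbZYXWVTSRQPNMLKJHGFDCB".toList) := by decide
      rw [Bool.eq_iff_iff, List.contains_iff_mem, List.contains_iff_mem]
      exact hperm.mem_iff)
    s.toList
  -- the consonant count: length of the filtered list = sum of the per-letter counts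
  have hlen : (s.toList.filter
      (fun char => "bcdfghjklmnpqrstvwxyzBCDFGHJKLMNPQRSTVWXYZ".toList.contains char)).length
      = (("zyxwvtsrqpnmlkjhgfdcbZYXWVTSRQPNMLKJHGFDCB".toList).map
          (fun c => s.toList.count c)).sum := by
    have h := congrArg List.length hk
    rw [PySem.List.length_sorted] at h
    simpa only [List.length_flatMap, List.length_replicate] using h
  rw [hv, hk, zip_map_flatMap, hlen]
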